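-- pv_equiv track=rewrite | github.com/kaspersespedal/hverdagsverktoy | scripts/fix_v10_batch3_stale_satser.py | extract_key_block_bounds
-- ===== SOURCE A (Python) =====
-- def extract_key_block_bounds(content, key, next_key_prefixes):
--     """Finn start:end indekser for `key:` helt til neste top-level key.
--
--     Siden selskapKsBody er en string-konkateneringskjede med `+`, kan vi ikke
--     enkelt finne slutten via string-literals. Bruk i stedet "start av neste key"
--     som terminator.
--     """
--     idx = content.find(f"{key}:")
--     if idx < 0:
--         return None
--     # Søk etter neste key etter vår key, for hver kandidat
--     end = len(content)
--     for prefix in next_key_prefixes: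
--         next_idx = content.find(prefix, idx + len(key) + 1)
--         if 0 < next_idx < end:
--             end = next_idx
--     return (idx, end)
-- ===== SOURCE B (Python) =====
-- def extract_key_block_bounds(content, key, next_key_prefixes):
--     """Single left-to-right scan: first position after the key where any
--     next-key prefix starts is the end; no per-prefix find passes."""
--     idx = content.find(key + ":")
--     if idx < 0:
--         return None
--     n = len(content)
--     for pos in range(idx + len(key) + 1, n):
--         if any(content.startswith(p, pos) for p in next_key_prefixes):
--             return (idx, pos)
--     return (idx, n)
-- ===== Notes on version B (the rewrite author's own statement) =====
-- stated objective: alternative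
-- what changed: Replaces the per-prefix loop of separate content.find scans with running-min bookkeeping by one left-to-right scan over positions after the key that stops at the first position where any prefix starts.
import Mathlib
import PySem

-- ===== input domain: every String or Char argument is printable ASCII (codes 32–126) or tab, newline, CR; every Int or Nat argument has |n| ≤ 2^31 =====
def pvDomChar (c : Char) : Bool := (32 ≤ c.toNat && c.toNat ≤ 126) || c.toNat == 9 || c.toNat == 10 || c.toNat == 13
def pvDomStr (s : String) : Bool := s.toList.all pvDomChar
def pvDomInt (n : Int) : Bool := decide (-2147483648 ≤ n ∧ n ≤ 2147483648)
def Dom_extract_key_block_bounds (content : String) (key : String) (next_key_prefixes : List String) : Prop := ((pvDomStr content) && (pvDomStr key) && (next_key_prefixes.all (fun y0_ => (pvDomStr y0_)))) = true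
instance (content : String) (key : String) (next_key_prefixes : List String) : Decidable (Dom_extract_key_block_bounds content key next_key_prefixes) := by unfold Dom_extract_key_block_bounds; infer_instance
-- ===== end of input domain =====

-- B replaces A's per-prefix find scans (running min) by a single left-to-right
-- scan that stops at the first position where any prefix starts (alternative algorithm, same results).

-- ===== PORT A =====
def extract_key_block_bounds (content : String) (key : String) (next_key_prefixes : List String) : Option (Int × Int) :=
  let c := content.toList
  let k := key.toList
  let idx : Int := PySem.Chars.find c (k ++ [':'])
  if idx < 0 then none
  else
    let e := next_key_prefixes.foldl
      (fun e p =>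
        let next_idx := PySem.Chars.findFrom c p.toList (idx + (k.length : Int) + 1)
        if 0 < next_idx ∧ next_idx < e then next_idx else e)
      (c.length : Int)
    some (idx, e)

-- ===== PORT B =====
def extract_key_block_bounds_alt (content : String) (key : String) (next_key_prefixes : List String) : Option (Int × Int) :=
  let c := content.toList
  let idx : Int := PySem.Chars.find c (key.toList ++ [':'])
  if idx < 0 then none
  else
    let n : Int := c.length
    match (PySem.List.pyRange (idx + (key.toList.length : Int) + 1) n).find?
        (fun pos => next_key_prefixes.any
          (fun p => PySem.Chars.startswith (c.drop pos.toNat) p.toList)) with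
    | some pos => some (idx, pos)
    | none => some (idx, n)

-- ===== PRECONDITION & SPEC =====
def Spec_extract_key_block_bounds (content : String) (key : String) (next_key_prefixes : List String) (out : Option (Int × Int)) : Prop := out = extract_key_block_bounds_alt content key next_key_prefixes
instance (content : String) (key : String) (next_key_prefixes : List String) (out : Option (Int × Int)) : Decidable (Spec_extract_key_block_bounds content key next_key_prefixes out) := by unfold Spec_extract_key_block_bounds; infer_instance

-- ===== CLAIM (what is proved, stated in full; the proofs are below) =====
def Claim_equal_extract_key_block_bounds : Prop := ∀ (content : String) (key : String) (next_key_prefixes : List String), Dom_extract_key_block_bounds content key next_key_prefixes → Spec_extract_key_block_bounds content key next_key_prefixes (extract_key_block_bounds content key next_key_prefixes)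

-- ===== LEMMAS AND PROOFS =====

-- "some prefix of ps starts at position j of c"
def pvMatch (c : List Char) (ps : List String) (j : Nat) : Prop :=
  ∃ p ∈ ps, p.toList <+: c.drop j

-- characterisation shared by both loop results: e is the least position in [s, n]
-- that is n or carries a prefix match
def pvGood (c : List Char) (ps : List String) (s n e : Int) : Prop :=
  s ≤ e ∧ e ≤ n ∧ (e = n ∨ pvMatch c ps e.toNat) ∧
    ∀ j : Int, s ≤ j → j < e → ¬ pvMatch c ps j.toNat

lemma pvGood_unique {c : List Char} {ps : List String} {s n e1 e2 : Int}
    (h1 : pvGood c ps s n e1) (h2 : pvGood c ps s n e2) : e1 = e2 := by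
  obtain ⟨hs1, hn1, hm1, hmin1⟩ := h1
  obtain ⟨hs2, hn2, hm2, hmin2⟩ := h2
  by_contra hne
  rcases lt_trichotomy e1 e2 with h | h | h
  · rcases hm1 with h1n | h1m
    · omega
    · exact hmin2 e1 hs1 h h1m
  · exact hne h
  · rcases hm2 with h2n | h2m
    · omega
    · exact hmin1 e2 hs2 h h2m

lemma pyRange_one_nil {a b : Int} (h : b ≤ a) : PySem.List.pyRange a b = [] := by
  simp [PySem.List.pyRange]
  intro _
  omega

lemma B_good (c : List Char) (ps : List String) :
    ∀ (m : Nat) (s : Int), 0 ≤ s → s ≤ (c.length : Int) → ((c.length : Int) - s).toNat ≤ m →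
    pvGood c ps s (c.length : Int)
      (match (PySem.List.pyRange s (c.length : Int)).find?
          (fun pos => ps.any (fun p => PySem.Chars.startswith (c.drop pos.toNat) p.toList)) with
        | some pos => pos
        | none => (c.length : Int)) := by
  intro m
  induction m with
  | zero =>
    intro s hs hsn hm
    have hs' : s = (c.length : Int) := by omega
    rw [pyRange_one_nil (le_of_eq hs'.symm), List.find?_nil]
    show pvGood c ps s (c.length : Int) (c.length : Int)
    refine ⟨hsn, le_refl _, Or.inl rfl, ?_⟩
    intro j hj1 hj2 _
    omega
  | succ m ih =>
    intro s hs hsn hm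
    by_cases hlt : s < (c.length : Int)
    · rw [PySem.List.pyRange_one_cons hlt]
      by_cases hmatch : (ps.any (fun p => PySem.Chars.startswith (c.drop s.toNat) p.toList)) = true
      · have hmatch' : (fun pos : Int => ps.any (fun p => PySem.Chars.startswith (c.drop pos.toNat) p.toList)) s = true := by simpa using hmatch
        rw [List.find?_cons_of_pos (p := fun pos : Int => ps.any fun p => PySem.Chars.startswith (List.drop pos.toNat c) p.toList) hmatch']
        show pvGood c ps s (c.length : Int) s
        refine ⟨le_refl _, le_of_lt hlt, Or.inr ?_, ?_⟩
        · simp only [List.any_eq_true, PySem.Chars.startswith_iff] at hmatch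
          exact hmatch
        · intro j hj1 hj2 _; omega
      · have hmatch' : ¬ (fun pos : Int => ps.any (fun p => PySem.Chars.startswith (c.drop pos.toNat) p.toList)) s = true := by simpa using hmatch
        rw [List.find?_cons_of_neg (p := fun pos : Int => ps.any fun p => PySem.Chars.startswith (List.drop pos.toNat c) p.toList) hmatch']
        have hres := ih (s + 1) (by omega) (by omega) (by omega)
        obtain ⟨h1, h2, h3, h4⟩ := hres
        refine ⟨by omega, h2, h3, ?_⟩
        intro j hj1 hj2 hj3
        by_cases hjs : j = s
        · apply hmatch
          subst hjs
          simp only [List.any_eq_true, PySem.Chars.startswith_iff]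
          exact hj3
        · exact h4 j (by omega) hj2 hj3
    · have hs' : (c.length : Int) ≤ s := by omega
      rw [pyRange_one_nil hs', List.find?_nil]
      show pvGood c ps s (c.length : Int) (c.length : Int)
      refine ⟨hsn, le_refl _, Or.inl rfl, ?_⟩
      intro j hj1 hj2 _
      omega

lemma foldl_min_spec (ni : String → Int) :
    ∀ (ps : List String) (e0 : Int),
    (ps.foldl (fun e p => if 0 < ni p ∧ ni p < e then ni p else e) e0) ≤ e0 ∧
    ((ps.foldl (fun e p => if 0 < ni p ∧ ni p < e then ni p else e) e0) = e0 ∨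
      ∃ p ∈ ps, 0 < ni p ∧ (ps.foldl (fun e p => if 0 < ni p ∧ ni p < e then ni p else e) e0) = ni p) ∧
    ∀ p ∈ ps, 0 < ni p → (ps.foldl (fun e p => if 0 < ni p ∧ ni p < e then ni p else e) e0) ≤ ni p := by
  intro ps
  induction ps with
  | nil => intro e0; exact ⟨le_refl _, Or.inl rfl, by simp⟩
  | cons p ps ih =>
    intro e0
    simp only [List.foldl_cons]
    by_cases h : 0 < ni p ∧ ni p < e0
    · rw [if_pos h]
      obtain ⟨h1, h2, h3⟩ := ih (ni p)
      refine ⟨by omega, ?_, ?_⟩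
      · rcases h2 with h2 | ⟨q, hq, hq1, hq2⟩
        · exact Or.inr ⟨p, List.mem_cons_self, h.1, h2⟩
        · exact Or.inr ⟨q, List.mem_cons_of_mem _ hq, hq1, hq2⟩
      · intro q hq hq1
        rcases List.mem_cons.mp hq with rfl | hq
        · exact h1
        · exact h3 q hq hq1
    · rw [if_neg h]
      obtain ⟨h1, h2, h3⟩ := ih e0
      refine ⟨h1, ?_, ?_⟩
      · rcases h2 with h2 | ⟨q, hq, hq1, hq2⟩
        · exact Or.inl h2
        · exact Or.inr ⟨q, List.mem_cons_of_mem _ hq, hq1, hq2⟩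
      · intro q hq hq1
        rcases List.mem_cons.mp hq with rfl | hq
        · omega
        · exact h3 q hq hq1

lemma A_good (c : List Char) (k : List Char) (ps : List String)
    (h0 : 0 ≤ PySem.Chars.find c (k ++ [':'])) :
    pvGood c ps (PySem.Chars.find c (k ++ [':']) + (k.length : Int) + 1) (c.length : Int)
      (ps.foldl
        (fun e p =>
          if 0 < PySem.Chars.findFrom c p.toList (PySem.Chars.find c (k ++ [':']) + (k.length : Int) + 1) ∧
             PySem.Chars.findFrom c p.toList (PySem.Chars.find c (k ++ [':']) + (k.length : Int) + 1) < e
          then PySem.Chars.findFrom c p.toList (PySem.Chars.find c (k ++ [':']) + (k.length : Int) + 1) else e)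
        (c.length : Int)) := by
  set idx := PySem.Chars.find c (k ++ [':']) with hidx
  -- the pattern occurs at idx, so idx + |k| + 1 ≤ |c|
  have hspec := PySem.Chars.find_spec (s := c) (sub := k ++ [':']) h0
  have hlen : idx.toNat + k.length + 1 ≤ c.length := by
    have := hspec.1.length_le
    simp [List.length_drop] at this
    omega
  have hle : idx ≤ (c.length : Int) := PySem.Chars.find_le_length c (k ++ [':'])
  set m : Nat := idx.toNat + k.length + 1 with hmdef
  have hscast : idx + (k.length : Int) + 1 = ((m : Nat) : Int) := by
    simp [hmdef]; omega
  have hmle : m ≤ c.length := hlen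
  -- per-prefix facts about ni p
  have hni : ∀ p : String,
      PySem.Chars.findFrom c p.toList (idx + (k.length : Int) + 1) = -1 ∨
      (((m : Nat) : Int) ≤ PySem.Chars.findFrom c p.toList (idx + (k.length : Int) + 1) ∧
       PySem.Chars.findFrom c p.toList (idx + (k.length : Int) + 1) ≤ (c.length : Int) ∧
       p.toList <+: c.drop (PySem.Chars.findFrom c p.toList (idx + (k.length : Int) + 1)).toNat ∧
       ∀ i : Nat, m ≤ i → i < (PySem.Chars.findFrom c p.toList (idx + (k.length : Int) + 1)).toNat →
         ¬ p.toList <+: c.drop i) := by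
    intro p
    rw [hscast, PySem.Chars.findFrom_natCast c p.toList m hmle]
    by_cases hf : PySem.Chars.find (c.drop m) p.toList = -1
    · exact Or.inl (by rw [if_pos hf])
    · rw [if_neg hf]
      have hf0 : 0 ≤ PySem.Chars.find (c.drop m) p.toList := by
        have := PySem.Chars.neg_one_le_find (c.drop m) p.toList
        omega
      have hfl : PySem.Chars.find (c.drop m) p.toList ≤ ((c.drop m).length : Int) :=
        PySem.Chars.find_le_length _ _
      have hfs := PySem.Chars.find_spec (s := c.drop m) (sub := p.toList) hf0
      refine Or.inr ⟨by omega, by simp [List.length_drop] at hfl ⊢; omega, ?_, ?_⟩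
      · have hpre := hfs.1
        rw [List.drop_drop] at hpre
        have harg : m + (PySem.Chars.find (List.drop m c) p.toList).toNat
            = (((m : Nat) : Int) + PySem.Chars.find (List.drop m c) p.toList).toNat := by omega
        rwa [harg] at hpre
      · intro i hi1 hi2
        have hnp := hfs.2 (i - m) (by omega)
        rw [List.drop_drop] at hnp
        have harg : m + (i - m) = i := by omega
        rwa [harg] at hnp
  have hfold := foldl_min_spec
    (fun p => PySem.Chars.findFrom c p.toList (idx + (k.length : Int) + 1)) ps (c.length : Int)
  obtain ⟨hf1, hf2, hf3⟩ := hfold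
  set r := ps.foldl
      (fun e p =>
        if 0 < PySem.Chars.findFrom c p.toList (idx + (k.length : Int) + 1) ∧
           PySem.Chars.findFrom c p.toList (idx + (k.length : Int) + 1) < e
        then PySem.Chars.findFrom c p.toList (idx + (k.length : Int) + 1) else e)
      (c.length : Int) with hrdef
  refine ⟨?_, hf1, ?_, ?_⟩
  · -- s ≤ r
    rcases hf2 with hr | ⟨p, hp, hp1, hp2⟩
    · rw [hscast, hr]; exact_mod_cast hmle
    · rcases hni p with hneg | ⟨ha, _, _, _⟩
      · omega
      · rw [hscast]; omega
  · -- r = n ∨ match at r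
    rcases hf2 with hr | ⟨p, hp, hp1, hp2⟩
    · exact Or.inl hr
    · rcases hni p with hneg | ⟨_, _, hpre, _⟩
      · omega
      · exact Or.inr ⟨p, hp, by rw [hp2]; exact hpre⟩
  · -- minimality
    intro j hj1 hj2 hjm
    obtain ⟨p, hp, hpre⟩ := hjm
    rw [hscast] at hj1
    -- p occurs at j ≥ m, so findFrom for p is found and ≤ j
    rcases hni p with hneg | ⟨ha, _, _, hmin⟩
    · -- findFrom = -1 means no occurrence ≥ m, contradiction
      rw [hscast, PySem.Chars.findFrom_natCast c p.toList m hmle] at hneg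
      by_cases hf : PySem.Chars.find (c.drop m) p.toList = -1
      · rw [PySem.Chars.find_eq_neg_one_iff] at hf
        apply hf
        have hsuf : c.drop j.toNat <:+ c.drop m := by
          have : c.drop j.toNat = (c.drop m).drop (j.toNat - m) := by
            rw [List.drop_drop]; congr 1; omega
          rw [this]; exact List.drop_suffix _ _
        exact hpre.isInfix.trans hsuf.isInfix
      · rw [if_neg hf] at hneg
        have := PySem.Chars.neg_one_le_find (c.drop m) p.toList
        omega
    · -- found: r ≤ ni p but ni p ≤ j by minimality of find, contradiction with j < r
      have hle' := hf3 p hp (by omega)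
      exact hmin j.toNat (by omega) (by omega) hpre

-- ===== VERDICT (by name: the statement is the Claim_ definition above) =====
theorem extract_key_block_bounds_spec : Claim_equal_extract_key_block_bounds := by
  intro content key next_key_prefixes _
  unfold Spec_extract_key_block_bounds
  unfold extract_key_block_bounds extract_key_block_bounds_alt
  simp only []
  by_cases h : PySem.Chars.find content.toList (key.toList ++ [':']) < 0
  · rw [if_pos h, if_pos h]
  · rw [if_neg h, if_neg h]
    have h0 : 0 ≤ PySem.Chars.find content.toList (key.toList ++ [':']) := by omega
    have hA := A_good content.toList key.toList next_key_prefixes h0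
    have hsn : PySem.Chars.find content.toList (key.toList ++ [':']) + (key.toList.length : Int) + 1
        ≤ (content.toList.length : Int) := hA.1.trans hA.2.1
    have hB := B_good content.toList next_key_prefixes
      ((content.toList.length : Int) - (PySem.Chars.find content.toList (key.toList ++ [':']) + (key.toList.length : Int) + 1)).toNat
      (PySem.Chars.find content.toList (key.toList ++ [':']) + (key.toList.length : Int) + 1)
      (by omega) hsn (le_refl _)
    have := pvGood_unique hA hB
    rw [this]
    cases hfind : List.find?
        (fun pos => next_key_prefixes.any fun p => PySem.Chars.startswith (List.drop pos.toNat content.toList) p.toList)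
        (PySem.List.pyRange (PySem.Chars.find content.toList (key.toList ++ [':']) + (key.toList.length : Int) + 1)
          (content.toList.length : Int)) with
    | none => rfl
    | some pos => rfl
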